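-- pv_equiv track=rewrite | github.com/luuchulsebosch21/Test | mcp_news_server/filter.py | filter_articles_simple
-- ===== SOURCE A (Python) =====
-- MAX_ARTICLES_PER_COMPANY = 10
--
-- def filter_articles_simple(
--     company_name: str,
--     articles: list[dict],
--     max_results: int = MAX_ARTICLES_PER_COMPANY,
-- ) -> list[dict]:
--     """
--     Lightweight keyword-based filter used as a fallback when the Claude API
--     is unavailable or for speed. Returns top `max_results` articles that
--     mention the company name in title or description.
--     """
--     name_lower = company_name.lower()
--     matched = []
--     unmatched = []
--     for article in articles:
--         text = (
--             (article.get("title") or "")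
--             + " "
--             + (article.get("description") or "")
--         ).lower()
--         if name_lower in text:
--             matched.append(article)
--         else:
--             unmatched.append(article)
--
--     combined = matched + unmatched
--     return combined[:max_results]
-- ===== SOURCE B (Python) =====
-- MAX_ARTICLES_PER_COMPANY = 10
--
-- def filter_articles_simple(
--     company_name: str,
--     articles: list[dict],
--     max_results: int = MAX_ARTICLES_PER_COMPANY,
-- ) -> list[dict]:
--     """Single stable sort by the boolean key 'does NOT mention the company';
--     matched articles (key False) sort first, each group keeps input order."""
--     name_lower = company_name.lower()
--
--     def misses(article):
--         text = (
--             (article.get("title") or "")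
--             + " "
--             + (article.get("description") or "")
--         ).lower()
--         return name_lower not in text
--
--     return sorted(articles, key=misses)[:max_results]
-- ===== Notes on version B (the rewrite author's own statement) =====
-- stated objective: idiomatic
-- what changed: Replaces the explicit matched/unmatched two-list partition and concatenation with one stable sorted() call keyed on the boolean 'company not mentioned', then a slice.
import Mathlib
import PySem

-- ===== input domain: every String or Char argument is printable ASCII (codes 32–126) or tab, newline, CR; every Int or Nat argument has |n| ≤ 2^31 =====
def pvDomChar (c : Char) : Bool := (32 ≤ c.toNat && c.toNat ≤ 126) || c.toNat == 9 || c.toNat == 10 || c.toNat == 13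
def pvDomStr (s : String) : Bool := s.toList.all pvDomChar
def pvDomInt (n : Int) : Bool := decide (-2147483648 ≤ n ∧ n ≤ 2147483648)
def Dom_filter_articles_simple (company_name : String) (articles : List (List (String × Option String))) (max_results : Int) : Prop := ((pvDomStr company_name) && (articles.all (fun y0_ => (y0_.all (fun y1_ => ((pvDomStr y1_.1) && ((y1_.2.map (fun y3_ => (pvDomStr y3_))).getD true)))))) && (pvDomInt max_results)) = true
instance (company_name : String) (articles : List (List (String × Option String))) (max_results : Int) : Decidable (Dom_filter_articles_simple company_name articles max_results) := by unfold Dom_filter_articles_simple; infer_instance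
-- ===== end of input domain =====

-- B replaces A's explicit matched/unmatched two-list partition with one stable sort by a
-- boolean "not mentioned" key followed by the same slice (idiomatic; same result proved equal).


-- ===== PORT A =====
-- text = ((article.get("title") or "") + " " + (article.get("description") or "")).lower()
-- exact: dict.get of a missing key is none (.join flattens), 'or ""' turns None/"" into ""
def pvText (article : List (String × Option String)) : String :=
  PySem.Str.lower
    ((((PySem.Dict.mk article).get? "title").join.getD "")
      ++ " "
      ++ (((PySem.Dict.mk article).get? "description").join.getD ""))

def filter_articles_simple (company_name : String) (articles : List (List (String × Option String))) (max_results : Int) : List (List (String × Option String)) :=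
  let name_lower := PySem.Str.lower company_name
  let mu := articles.foldl
    (fun (acc : List (List (String × Option String)) × List (List (String × Option String))) article =>
      if PySem.Str.isIn name_lower (pvText article) then (acc.1 ++ [article], acc.2)
      else (acc.1, acc.2 ++ [article]))
    ([], [])
  let combined := mu.1 ++ mu.2
  PySem.List.slice combined none (some max_results)

-- ===== PORT B =====
def filter_articles_simple_alt (company_name : String) (articles : List (List (String × Option String))) (max_results : Int) : List (List (String × Option String)) :=
  let name_lower := PySem.Str.lower company_name
  let misses := fun (article : List (String × Option String)) =>
    !(PySem.Str.isIn name_lower (pvText article))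
  PySem.List.slice (PySem.List.sorted articles misses false) none (some max_results)

-- ===== PRECONDITION & SPEC =====
def Spec_filter_articles_simple (company_name : String) (articles : List (List (String × Option String))) (max_results : Int) (out : List (List (String × Option String))) : Prop := out = filter_articles_simple_alt company_name articles max_results
instance (company_name : String) (articles : List (List (String × Option String))) (max_results : Int) (out : List (List (String × Option String))) : Decidable (Spec_filter_articles_simple company_name articles max_results out) := by unfold Spec_filter_articles_simple; infer_instance

-- ===== CLAIM (what is proved, stated in full; the proofs are below) =====
def Claim_equal_filter_articles_simple : Prop := ∀ (company_name : String) (articles : List (List (String × Option String))) (max_results : Int), Dom_filter_articles_simple company_name articles max_results → Spec_filter_articles_simple company_name articles max_results (filter_articles_simple company_name articles max_results)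

-- ===== LEMMAS AND PROOFS =====

-- inserting a key-false element into (all-false F ++ all-true T) lands between the groups
theorem pv_insertBy_mid {α : Type} (key : α → Bool) (x : α) (F T : List α)
    (hF : ∀ y ∈ F, key y = false) (hT : ∀ y ∈ T, key y = true) (hx : key x = false) :
    PySem.List.insertBy (fun a b => decide (key a < key b)) x (F ++ T) = F ++ x :: T := by
  induction F with
  | nil =>
    cases T with
    | nil => simp [PySem.List.insertBy]
    | cons t ts =>
      have := hT t (by simp)
      simp [PySem.List.insertBy, hx, this]
  | cons f fs ih =>
    have hf := hF f (by simp)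
    simp only [List.cons_append, PySem.List.insertBy, hx, hf]
    simp only [decide_eq_true_eq]
    rw [if_neg (by simp [hf, hx, Bool.lt_iff])]
    rw [ih (fun y hy => hF y (by simp [hy]))]

-- inserting a key-true element goes to the end
theorem pv_insertBy_end {α : Type} (key : α → Bool) (x : α) (l : List α) (hx : key x = true) :
    PySem.List.insertBy (fun a b => decide (key a < key b)) x l = l ++ [x] := by
  apply PySem.List.insertBy_of_forall_not_before
  intro y _
  simp [hx, Bool.lt_iff]

-- insertion sort by a boolean key is the stable partition
theorem pv_foldl_insertBy_partition {α : Type} (key : α → Bool) :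
    ∀ (xs F T : List α), (∀ y ∈ F, key y = false) → (∀ y ∈ T, key y = true) →
      xs.foldl (fun acc x => PySem.List.insertBy (fun a b => decide (key a < key b)) x acc) (F ++ T)
        = (F ++ xs.filter (fun x => !key x)) ++ (T ++ xs.filter key) := by
  intro xs
  induction xs with
  | nil => intro F T _ _; simp
  | cons x xs ih =>
    intro F T hF hT
    by_cases hx : key x = true
    · rw [List.foldl_cons, pv_insertBy_end key x (F ++ T) hx, List.append_assoc]
      rw [ih F (T ++ [x]) hF (by intro y hy; rcases List.mem_append.mp hy with h | h
                                 · exact hT y h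
                                 · simp at h; simpa [h])]
      simp [List.filter_cons, hx]
    · have hx' : key x = false := by simpa using hx
      rw [List.foldl_cons, pv_insertBy_mid key x F T hF hT hx']
      have : F ++ x :: T = (F ++ [x]) ++ T := by simp
      rw [this, ih (F ++ [x]) T (by intro y hy; rcases List.mem_append.mp hy with h | h
                                    · exact hF y h
                                    · simp at h; simpa [h]) hT]
      simp [List.filter_cons, hx']

theorem pv_sorted_bool {α : Type} (key : α → Bool) (xs : List α) :
    PySem.List.sorted xs key false = xs.filter (fun x => !key x) ++ xs.filter key := by
  rw [PySem.List.sorted_eq_foldl_insertBy]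
  have := pv_foldl_insertBy_partition key xs [] [] (by simp) (by simp)
  simpa using this

-- A's pair-accumulator fold is the pair of filters
theorem pv_foldl_partition {α : Type} (p : α → Bool) :
    ∀ (xs : List α) (m u : List α),
      xs.foldl (fun (acc : List α × List α) a =>
        if p a then (acc.1 ++ [a], acc.2) else (acc.1, acc.2 ++ [a])) (m, u)
        = (m ++ xs.filter p, u ++ xs.filter (fun a => !p a)) := by
  intro xs
  induction xs with
  | nil => intro m u; simp
  | cons x xs ih =>
    intro m u
    by_cases hx : p x = true
    · simp [List.foldl_cons, hx, ih]
    · have hx' : p x = false := by simpa using hx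
      simp [List.foldl_cons, hx', ih]

-- ===== VERDICT (by name: the statement is the Claim_ definition above) =====
theorem filter_articles_simple_spec : Claim_equal_filter_articles_simple := by
  intro company_name articles max_results _
  unfold Spec_filter_articles_simple filter_articles_simple filter_articles_simple_alt
  simp only []
  rw [pv_foldl_partition (fun article => PySem.Str.isIn (PySem.Str.lower company_name) (pvText article)) articles [] []]
  rw [pv_sorted_bool (fun article => !(PySem.Str.isIn (PySem.Str.lower company_name) (pvText article))) articles]
  simp [Bool.not_not]
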